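-- pv_equiv track=rewrite | github.com/Zacharyr41/readmission_predictor_mimic | tests/test_gnn/test_hop_extraction.py | _diagnosis_edge_sequence
-- ===== SOURCE A (Python) =====
-- def _diagnosis_edge_sequence(k_hops: int = 2) -> list[tuple[str, str, str]]:
--     """Alternating edge sequence for the diagnosis meta-path."""
--     seq = [
--         ("admission", "has_diagnosis", "diagnosis"),
--         ("diagnosis", "rev_has_diagnosis", "admission"),
--     ]
--     full = []
--     for i in range(k_hops):
--         full.append(seq[i % 2])
--     return full
-- ===== SOURCE B (Python) =====
-- def _diagnosis_edge_sequence(k_hops: int = 2) -> list[tuple[str, str, str]]: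
--     """Alternating edge sequence for the diagnosis meta-path (closed form)."""
--     seq = [
--         ("admission", "has_diagnosis", "diagnosis"),
--         ("diagnosis", "rev_has_diagnosis", "admission"),
--     ]
--     n = max(k_hops, 0)
--     return seq * (n // 2) + seq[:n % 2]
-- ===== Notes on version B (the rewrite author's own statement) =====
-- stated objective: simpler
-- what changed: Replaces the index-mod loop with a closed-form construction: repeat the two-element base pair n//2 times and append a slice of length n%2, with n = max(k_hops, 0).
import Mathlib
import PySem

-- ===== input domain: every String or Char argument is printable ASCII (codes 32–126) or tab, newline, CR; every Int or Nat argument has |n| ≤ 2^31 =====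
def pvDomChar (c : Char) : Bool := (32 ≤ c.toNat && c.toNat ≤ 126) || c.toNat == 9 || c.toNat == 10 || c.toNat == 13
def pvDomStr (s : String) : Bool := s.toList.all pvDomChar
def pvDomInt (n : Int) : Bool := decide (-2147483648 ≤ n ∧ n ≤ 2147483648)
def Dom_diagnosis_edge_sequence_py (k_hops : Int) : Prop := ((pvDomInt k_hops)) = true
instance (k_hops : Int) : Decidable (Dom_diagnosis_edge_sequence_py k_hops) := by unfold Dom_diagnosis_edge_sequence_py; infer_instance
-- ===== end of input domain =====

-- B builds the alternating sequence in closed form (n//2 full pairs plus an n%2 slice) instead of A's index-mod loop; objective: simpler.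

-- ===== PORT A =====
-- the two-element base sequence shared by both Pythons
def pvSeq : List (String × String × String) :=
  [("admission", "has_diagnosis", "diagnosis"),
   ("diagnosis", "rev_has_diagnosis", "admission")]

def diagnosis_edge_sequence_py (k_hops : Int) : List (String × String × String) :=
  (PySem.List.pyRange 0 k_hops 1).foldl
    (fun full i => full ++ [PySem.List.pyGetD pvSeq (PySem.Int.mod i 2) ("", "", "")]) []

-- ===== PORT B =====
def diagnosis_edge_sequence_py_alt (k_hops : Int) : List (String × String × String) :=
  let n := max k_hops 0
  (List.replicate (PySem.Int.floordiv n 2).toNat pvSeq).flatten ++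
    PySem.List.slice pvSeq none (some (PySem.Int.mod n 2))

-- ===== PRECONDITION & SPEC =====
def Spec_diagnosis_edge_sequence_py (k_hops : Int) (out : List (String × String × String)) : Prop := out = diagnosis_edge_sequence_py_alt k_hops
instance (k_hops : Int) (out : List (String × String × String)) : Decidable (Spec_diagnosis_edge_sequence_py k_hops out) := by unfold Spec_diagnosis_edge_sequence_py; infer_instance

-- ===== CLAIM (what is proved, stated in full; the proofs are below) =====
def Claim_equal_diagnosis_edge_sequence_py : Prop := ∀ (k_hops : Int), Dom_diagnosis_edge_sequence_py k_hops → Spec_diagnosis_edge_sequence_py k_hops (diagnosis_edge_sequence_py k_hops)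

-- ===== LEMMAS AND PROOFS =====

theorem pv_aux (m : Nat) :
    diagnosis_edge_sequence_py (m : Int) =
      (List.replicate (m / 2) pvSeq).flatten ++ pvSeq.take (m % 2) := by
  induction m with
  | zero => decide
  | succ m ih =>
    have hb : (0 : Int) ≤ (m : Int) := Int.natCast_nonneg m
    unfold diagnosis_edge_sequence_py at ih ⊢
    push_cast
    rw [PySem.List.pyRange_one_succ_right hb, List.foldl_append, ih]
    simp only [List.foldl_cons, List.foldl_nil]
    rcases Nat.even_or_odd m with hm | hm
    · obtain ⟨t, ht⟩ := hm
      subst ht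
      have h2 : (t + t) % 2 = 0 := by omega
      have h3 : (t + t + 1) / 2 = (t + t) / 2 := by omega
      have h4 : (t + t + 1) % 2 = 1 := by omega
      have hm0 : PySem.Int.mod ((t + t : Nat) : Int) 2 = 0 := by
        rw [PySem.Int.mod_eq_emod_of_pos (by norm_num)]; omega
      rw [h2, h3, h4, hm0]
      simp [pvSeq, PySem.List.pyGetD, PySem.List.pyGet?, PySem.List.pyIdx?]
    · obtain ⟨t, ht⟩ := hm
      subst ht
      have h2 : (2 * t + 1) % 2 = 1 := by omega
      have h3 : (2 * t + 1 + 1) / 2 = (2 * t + 1) / 2 + 1 := by omega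
      have h4 : (2 * t + 1 + 1) % 2 = 0 := by omega
      have hm1 : PySem.Int.mod ((2 * t + 1 : Nat) : Int) 2 = 1 := by
        rw [PySem.Int.mod_eq_emod_of_pos (by norm_num)]; omega
      rw [h2, h3, h4, hm1, List.replicate_succ']
      simp [pvSeq, PySem.List.pyGetD, PySem.List.pyGet?, PySem.List.pyIdx?]

-- ===== VERDICT (by name: the statement is the Claim_ definition above) =====
theorem diagnosis_edge_sequence_py_spec : Claim_equal_diagnosis_edge_sequence_py := by
  intro k _
  unfold Spec_diagnosis_edge_sequence_py diagnosis_edge_sequence_py_alt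
  by_cases hk : k ≤ 0
  · have hmax : max k 0 = 0 := by omega
    rw [hmax]
    unfold diagnosis_edge_sequence_py
    rw [PySem.List.pyRange_one_eq_nil hk]
    decide
  · obtain ⟨m, rfl⟩ : ∃ m : Nat, k = (m : Int) := ⟨k.toNat, by omega⟩
    have hmax : max (m : Int) 0 = (m : Int) := by omega
    have hd : (PySem.Int.floordiv ((m : Nat) : Int) 2).toNat = m / 2 := by
      rw [PySem.Int.floordiv_eq_ediv_of_pos (by norm_num)]; omega
    have hm : PySem.Int.mod ((m : Nat) : Int) 2 = ((m % 2 : Nat) : Int) := by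
      rw [PySem.Int.mod_eq_emod_of_pos (by norm_num)]; omega
    rw [pv_aux]
    simp only [hmax, hd, hm, PySem.List.slice_to_natCast]
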